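-- pv_equiv track=rewrite | github.com/ericzhang98/competitive | codejam/kickstart_2022/round_a/c.py | solution
-- ===== SOURCE A (Python) =====
-- def solution(S):
--     N = len(S)
--     if N < 5:
--         return "POSSIBLE"
--
--     def is_palindrome(cand):
--         return cand == cand[::-1]
--
--     # dp = dict()
--     # for k in [format(x, 'b').zfill(4) for x in range(0, 16)]:
--     #     dp[k] = False
--     possible_starting = [S[:5]]
--     while True:
--         breakout = True
--         for s in list(possible_starting):
--             if '?' in s:
--                 breakout = False
--                 possible_starting.remove(s)
--                 idx = s.index('?')
--                 possible_starting.append(s[:idx] + '0' + s[idx+1:])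
--                 possible_starting.append(s[:idx] + '1' + s[idx+1:])
--         if breakout: break
--     possible_starting = [s for s in possible_starting if not is_palindrome(s)]
--     cur = possible_starting
--     for i in range(5, N):
--         # eprint(cur)
--         nxt = []
--         possible_chars = ['0', '1'] if S[i] == '?' else [S[i]]
--         for possible_char in possible_chars:
--             for k in cur:
--                 cand = k + possible_char
--                 assert(len(cand) == 6)
--                 # eprint(i, cand, not is_palindrome(cand))
--                 if not is_palindrome(cand) and not is_palindrome(cand[1:]):
--                     nxt.append(cand[1:])
--         cur = nxt
--     # eprint(cur)
--     return "POSSIBLE" if len(cur) > 0 else "IMPOSSIBLE"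
-- ===== SOURCE B (Python) =====
-- def solution(S):
--     N = len(S)
--     if N < 5:
--         return "POSSIBLE"
--
--     def opts(c):
--         return "01" if c == '?' else c
--
--     def windows(pat):
--         # all concrete 5-char windows matching the pattern ('?' -> '0'/'1')
--         ws = [""]
--         for c in pat:
--             ws = [w + o for w in ws for o in opts(c)]
--         return ws
--
--     def pal5(w):
--         return w[0] == w[4] and w[1] == w[3]
--
--     def pal6(v):
--         return v[0] == v[5] and v[1] == v[4] and v[2] == v[3]
--
--     # Backward feasibility DP: feas = windows at position i that can start a
--     # palindrome-free completion of S[i:].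
--     feas = {w for w in windows(S[N - 5:]) if not pal5(w)}
--     for i in range(N - 6, -1, -1):
--         feas = {w for w in windows(S[i:i + 5]) if not pal5(w)
--                 and any(not pal6(w + o) and w[1:] + o in feas
--                         for o in opts(S[i + 5]))}
--     return "POSSIBLE" if feas else "IMPOSSIBLE"
-- ===== Notes on version B (the rewrite author's own statement) =====
-- stated objective: alternative
-- what changed: A enumerates, left to right, a frontier LIST of concrete prefix windows (with a rewriting while-loop using remove/index to expand '?') that can grow exponentially; B instead runs a backward suffix-feasibility DP: scanning right to left it computes, for each position, the set of at most 32 concrete 5-char windows that can start a palindrome-free completion of the remaining suffix (palindromes tested by index equations, not reversal), and answers from feasibility at position 0.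
import Mathlib
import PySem

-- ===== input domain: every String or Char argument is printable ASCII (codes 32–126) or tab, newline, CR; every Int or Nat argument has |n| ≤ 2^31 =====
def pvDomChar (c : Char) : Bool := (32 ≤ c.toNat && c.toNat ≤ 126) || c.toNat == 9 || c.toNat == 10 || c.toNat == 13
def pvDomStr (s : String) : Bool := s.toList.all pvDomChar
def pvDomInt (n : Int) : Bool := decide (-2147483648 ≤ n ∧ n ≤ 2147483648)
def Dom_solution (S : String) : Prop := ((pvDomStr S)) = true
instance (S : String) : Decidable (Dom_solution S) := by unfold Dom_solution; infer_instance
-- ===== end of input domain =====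

-- B replaces A's forward enumeration of prefix assignments by a backward
-- suffix-feasibility DP over the ≤32 concrete windows of each position (alternative).

-- ===== PORT A =====

-- is_palindrome(cand): cand == cand[::-1]  ([::-1] is reversal)
def palA (cs : List Char) : Bool := cs == cs.reverse

-- s[:idx] + c + s[idx+1:]  with idx = s.index('?')  (the index always succeeds when '?' in s)
def setQ (s : List Char) (c : Char) : List Char :=
  let idx := (PySem.List.index? s '?').getD 0
  s.take idx ++ c :: s.drop (idx + 1)

-- one "for s in list(possible_starting): …" pass; state = (live list, breakout flag);
-- .getD is a totality guard for list.remove (the removed element is always present)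
def expandStep (st : List (List Char) × Bool) (s : List Char) : List (List Char) × Bool :=
  if '?' ∈ s then
    (((PySem.List.remove? st.1 s).getD st.1) ++ [setQ s '0', setQ s '1'], false)
  else st

-- the "while True: … if breakout: break" loop; the fuel is a totality guard only (the loop
-- breaks out after at most (number of '?' in the 5-char window) + 1 ≤ fuel passes)
def expandLoop : Nat → List (List Char) → List (List Char)
  | 0, ps => ps
  | n + 1, ps =>
    let r := ps.foldl expandStep (ps, true)
    if r.2 then r.1 else expandLoop n r.1

-- body of "for i in range(5, N)" as a function of cur and S[i]
def stepA (cur : List (List Char)) (c : Char) : List (List Char) :=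
  let chars := if c == '?' then ['0', '1'] else [c]
  chars.foldl (fun nxt pc =>
    cur.foldl (fun nxt k =>
      let cand := k ++ [pc]
      if !(palA cand) && !(palA (cand.drop 1)) then nxt ++ [cand.drop 1] else nxt) nxt) []

def solution (S : String) : String :=
  let cs := S.toList
  let N : Int := PySem.Str.len S
  if N < 5 then "POSSIBLE"
  else
    let w := cs.take 5                                 -- S[:5]
    let start := expandLoop (w.length + 1) [w]
    let possible := start.filter (fun s => !(palA s))  -- [s for s in … if not is_palindrome(s)]
    let cur := (PySem.List.pyRange 5 N 1).foldl
      (fun cur i => stepA cur (PySem.List.pyGetD cs i ' ')) possible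
    if cur.length > 0 then "POSSIBLE" else "IMPOSSIBLE"

-- ===== PORT B =====

-- "01" if c == '?' else c  (as the list of option characters)
def optsB (c : Char) : List Char := if c == '?' then ['0', '1'] else [c]

-- windows(pat): ws = [w + o for w in ws for o in opts(c)] over the pattern's chars
def winsB (pat : List Char) : List (List Char) :=
  pat.foldl (fun ws c => ws.flatMap (fun w => (optsB c).map (fun o => w ++ [o]))) [[]]

-- pal5(w): w[0] == w[4] and w[1] == w[3]  (windows always have length 5; getD is in range)
def pal5B (w : List Char) : Bool := (w.getD 0 ' ' == w.getD 4 ' ') && (w.getD 1 ' ' == w.getD 3 ' ')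

-- pal6(v): v[0] == v[5] and v[1] == v[4] and v[2] == v[3]  (always length 6)
def pal6B (v : List Char) : Bool :=
  (v.getD 0 ' ' == v.getD 5 ' ') && (v.getD 1 ' ' == v.getD 4 ' ') && (v.getD 2 ' ' == v.getD 3 ' ')

-- the backward loop "for i in range(N-6, -1, -1)": feas for pattern pat = S[i:i+5] and
-- remaining suffix rest = S[i+5:], computed right to left (structural recursion on rest)
def feasB : List Char → List Char → PySem.Set (List Char)
  | pat, [] => PySem.Set.ofList ((winsB pat).filter (fun w => !(pal5B w)))
  | pat, c :: r =>
    let nxt := feasB (pat.drop 1 ++ [c]) r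
    PySem.Set.ofList ((winsB pat).filter (fun w => !(pal5B w) &&
      (optsB c).any (fun o => !(pal6B (w ++ [o])) && PySem.Set.contains nxt (w.drop 1 ++ [o]))))

def solution_alt (S : String) : String :=
  let cs := S.toList
  if PySem.Str.len S < 5 then "POSSIBLE"
  else
    let feas := feasB (cs.take 5) (cs.drop 5)
    if feas.isEmpty then "IMPOSSIBLE" else "POSSIBLE"

-- ===== PRECONDITION & SPEC =====
def Spec_solution (S : String) (out : String) : Prop := out = solution_alt S
instance (S : String) (out : String) : Decidable (Spec_solution S out) := by unfold Spec_solution; infer_instance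

-- ===== CLAIM (what is proved, stated in full; the proofs are below) =====
def Claim_equal_solution : Prop := ∀ (S : String), Dom_solution S → Spec_solution S (solution S)


-- ===== LEMMAS AND PROOFS =====

def cmatch (a c : Char) : Bool := if c == '?' then a == '0' || a == '1' else a == c

def matchB : List Char → List Char → Bool
  | [], [] => true
  | a :: x, c :: w => cmatch a c && matchB x w
  | _, _ => false

theorem matchB_nil_iff (x : List Char) : matchB x [] = true ↔ x = [] := by
  cases x <;> simp [matchB]

theorem matchB_noq (s : List Char) (h : '?' ∉ s) (x : List Char) :
    matchB x s = true ↔ x = s := by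
  induction s generalizing x with
  | nil => cases x <;> simp [matchB]
  | cons c w ih =>
    cases x with
    | nil => simp [matchB]
    | cons a y =>
      have hc : c ≠ '?' := fun hc => h (by simp [hc])
      simp [matchB, cmatch, hc, ih (fun hm => h (List.mem_cons_of_mem _ hm)) y]

theorem matchB_resolve (pre suf x : List Char) :
    matchB x (pre ++ '?' :: suf) = true ↔
      (matchB x (pre ++ '0' :: suf) = true ∨ matchB x (pre ++ '1' :: suf) = true) := by
  induction pre generalizing x with
  | nil =>
    cases x with
    | nil => simp [matchB]
    | cons a y => simp [matchB, cmatch]; tauto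
  | cons c p ih =>
    cases x with
    | nil => simp [matchB]
    | cons a y => simp [matchB, ih y]; tauto

theorem matchB_length (x s : List Char) (h : matchB x s = true) : x.length = s.length := by
  induction s generalizing x with
  | nil => rw [matchB_nil_iff] at h; simp [h]
  | cons c w ih =>
    cases x with
    | nil => simp [matchB] at h
    | cons a y =>
      simp only [matchB, Bool.and_eq_true] at h
      simp [ih y h.2]

theorem matchB_append_singleton (u : List Char) (c : Char) (x : List Char) :
    matchB x (u ++ [c]) = true ↔
      ∃ y a, x = y ++ [a] ∧ matchB y u = true ∧ cmatch a c = true := by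
  induction u generalizing x with
  | nil =>
    constructor
    · intro h
      match x with
      | [] => simp [matchB] at h
      | [a] => exact ⟨[], a, rfl, rfl, by simpa [matchB] using h⟩
      | a :: b :: z => simp [matchB] at h
    · rintro ⟨y, a, rfl, h2, h3⟩
      rw [matchB_nil_iff] at h2; subst h2; simpa [matchB] using h3
  | cons d u ih =>
    cases x with
    | nil =>
      simp only [List.cons_append, matchB, Bool.false_eq_true, false_iff]
      rintro ⟨y, a, hy, h2, h3⟩
      cases y <;> simp at hy
    | cons a y =>
      simp only [List.cons_append, matchB, Bool.and_eq_true, ih y]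
      constructor
      · rintro ⟨h1, w, b, rfl, h2, h3⟩
        exact ⟨a :: w, b, rfl, by simp [matchB, h1, h2], h3⟩
      · rintro ⟨w, b, hw, h2, h3⟩
        cases w with
        | nil => simp [matchB] at h2
        | cons a' w' =>
          simp only [List.cons_append, List.cons.injEq] at hw
          obtain ⟨rfl, hy⟩ := hw
          simp only [matchB, Bool.and_eq_true] at h2
          exact ⟨h2.1, w', b, hy, h2.2, h3⟩

theorem matchB_drop1 (x s : List Char) (h : matchB x s = true) :
    matchB (x.drop 1) (s.drop 1) = true := by
  cases s with
  | nil => rw [matchB_nil_iff] at h; simp [h, matchB]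
  | cons c w =>
    cases x with
    | nil => simp [matchB] at h
    | cons a y => simp only [matchB, Bool.and_eq_true] at h; simpa using h.2

theorem mem_optsB (c o : Char) : o ∈ optsB c ↔ cmatch o c = true := by
  by_cases h : c = '?' <;> simp [optsB, cmatch, h]

theorem drop1_append (w : List Char) (o : Char) (h : w ≠ []) :
    w.drop 1 ++ [o] = (w ++ [o]).drop 1 := by
  cases w with
  | nil => exact absurd rfl h
  | cons a y => simp

-- membership in winsB via the match predicate
theorem mem_winsFold (pat : List Char) : ∀ (u : List Char) (acc : List (List Char)),
    (∀ x, x ∈ acc ↔ matchB x u = true) →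
    ∀ x, (x ∈ pat.foldl (fun ws c => ws.flatMap (fun w => (optsB c).map (fun o => w ++ [o]))) acc ↔
      matchB x (u ++ pat) = true) := by
  induction pat with
  | nil => intro u acc h x; simpa using h x
  | cons c p ih =>
    intro u acc h x
    rw [List.foldl_cons, show u ++ c :: p = (u ++ [c]) ++ p by simp]
    refine ih (u ++ [c]) _ ?_ x
    intro y
    simp only [List.mem_flatMap, List.mem_map]
    rw [matchB_append_singleton]
    constructor
    · rintro ⟨w, hw, o, ho, rfl⟩
      exact ⟨w, o, rfl, (h w).1 hw, (mem_optsB c o).1 ho⟩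
    · rintro ⟨w, o, rfl, h2, h3⟩
      exact ⟨w, (h w).2 h2, o, (mem_optsB c o).2 h3, rfl⟩

theorem mem_winsB (pat x : List Char) : x ∈ winsB pat ↔ matchB x pat = true := by
  have := mem_winsFold pat [] [[]] (by intro y; simp [matchB_nil_iff]) x
  simpa [winsB] using this

theorem qdecomp (s : List Char) (h : '?' ∈ s) :
    ∃ pre suf, s = pre ++ '?' :: suf ∧ '?' ∉ pre ∧
      (PySem.List.index? s '?').getD 0 = pre.length := by
  have h1 : (PySem.List.index? s '?').isSome := (PySem.List.index?_isSome_iff s '?').2 h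
  obtain ⟨k, hk⟩ := Option.isSome_iff_exists.1 h1
  obtain ⟨pre, suf, hs, hl, hn⟩ := (PySem.List.index?_eq_some_iff s '?' k).1 hk
  exact ⟨pre, suf, hs, hn, by rw [hk]; simpa using hl.symm⟩

theorem setQ_eq (pre suf : List Char) (hp : '?' ∉ pre) (c : Char) :
    setQ (pre ++ '?' :: suf) c = pre ++ c :: suf := by
  have hidx : PySem.List.index? (pre ++ '?' :: suf) '?' = some pre.length :=
    (PySem.List.index?_eq_some_iff _ _ _).2 ⟨pre, suf, rfl, rfl, hp⟩
  have hdrop : (pre ++ '?' :: suf).drop (pre.length + 1) = suf := by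
    have : pre ++ '?' :: suf = (pre ++ ['?']) ++ suf := by simp
    rw [this, show pre.length + 1 = (pre ++ ['?']).length by simp, List.drop_left]
  simp only [setQ]
  rw [hidx]
  simp only [Option.getD_some]
  rw [hdrop, List.take_left]

theorem matchB_setQ (s : List Char) (h : '?' ∈ s) (x : List Char) :
    matchB x s = true ↔ (matchB x (setQ s '0') = true ∨ matchB x (setQ s '1') = true) := by
  obtain ⟨pre, suf, rfl, hp, -⟩ := qdecomp s h
  rw [setQ_eq pre suf hp, setQ_eq pre suf hp, matchB_resolve]

theorem count_setQ (s : List Char) (h : '?' ∈ s) (c : Char) (hc : c ≠ '?') :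
    (setQ s c).count '?' + 1 = s.count '?' := by
  obtain ⟨pre, suf, rfl, hp, -⟩ := qdecomp s h
  rw [setQ_eq pre suf hp]
  simp [List.count_append, List.count_eq_zero.2 hp, hc]

theorem passNone (todo : List (List Char)) (st : List (List Char) × Bool)
    (h : ∀ s ∈ todo, '?' ∉ s) : todo.foldl expandStep st = st := by
  induction todo generalizing st with
  | nil => rfl
  | cons s t ih =>
    rw [List.foldl_cons, show expandStep st s = st by simp [expandStep, h s (by simp)]]
    exact ih _ (fun u hu => h u (List.mem_cons_of_mem _ hu))

theorem passAll (todo pre : List (List Char)) (b : Bool)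
    (h : ∀ s ∈ todo, '?' ∈ s) :
    todo.foldl expandStep (todo ++ pre, b) =
      (pre ++ todo.flatMap (fun s => [setQ s '0', setQ s '1']),
        if todo.isEmpty then b else false) := by
  induction todo generalizing pre b with
  | nil => simp
  | cons s t ih =>
    rw [List.foldl_cons]
    have hstep : expandStep ((s :: t) ++ pre, b) s =
        (t ++ (pre ++ [setQ s '0', setQ s '1']), false) := by
      simp [expandStep, h s (by simp), PySem.List.remove?_cons_self]
    rw [hstep, ih (pre ++ [setQ s '0', setQ s '1']) false
      (fun u hu => h u (List.mem_cons_of_mem _ hu))]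
    simp

theorem expandLoop_mem (q : Nat) : ∀ (fuel : Nat) (ps : List (List Char)) (x : List Char),
    q < fuel → (∀ s ∈ ps, s.count '?' = q) →
    (x ∈ expandLoop fuel ps ↔ ∃ s ∈ ps, matchB x s = true) := by
  induction q with
  | zero =>
    intro fuel ps x hf hq
    obtain ⟨n, rfl⟩ : ∃ n, fuel = n + 1 := ⟨fuel - 1, by omega⟩
    have hnoq : ∀ s ∈ ps, '?' ∉ s := fun s hs => List.count_eq_zero.1 (hq s hs)
    simp only [expandLoop, passNone ps (ps, true) hnoq]
    constructor
    · intro hx; exact ⟨x, hx, (matchB_noq x (hnoq x hx) x).2 rfl⟩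
    · rintro ⟨s, hs, hm⟩; rwa [(matchB_noq s (hnoq s hs) x).1 hm]
  | succ q ih =>
    intro fuel ps x hf hq
    obtain ⟨n, rfl⟩ : ∃ n, fuel = n + 1 := ⟨fuel - 1, by omega⟩
    cases ps with
    | nil => simp [expandLoop]
    | cons p t =>
      have hqs : ∀ s ∈ p :: t, '?' ∈ s := fun s hs =>
        List.count_pos_iff.1 (by rw [hq s hs]; omega)
      have hpass := passAll (p :: t) [] true hqs
      rw [List.append_nil] at hpass
      simp only [expandLoop, hpass, List.isEmpty_cons]
      rw [if_neg (by simp), List.nil_append]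
      rw [ih n _ x (by omega) ?_]
      · constructor
        · rintro ⟨u, hu, hm⟩
          rw [List.mem_flatMap] at hu
          obtain ⟨s, hs, hu⟩ := hu
          refine ⟨s, hs, (matchB_setQ s (hqs s hs) x).2 ?_⟩
          simp at hu
          rcases hu with rfl | rfl
          · exact Or.inl hm
          · exact Or.inr hm
        · rintro ⟨s, hs, hm⟩
          rcases (matchB_setQ s (hqs s hs) x).1 hm with h0 | h1
          · exact ⟨setQ s '0', List.mem_flatMap.2 ⟨s, hs, by simp⟩, h0⟩
          · exact ⟨setQ s '1', List.mem_flatMap.2 ⟨s, hs, by simp⟩, h1⟩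
      · intro u hu
        rw [List.mem_flatMap] at hu
        obtain ⟨s, hs, hu⟩ := hu
        have := count_setQ s (hqs s hs)
        have hc := hq s hs
        simp at hu
        rcases hu with rfl | rfl
        · have := this '0' (by decide); omega
        · have := this '1' (by decide); omega

-- pal5B / pal6B agree with reversal-palindromeness on the right lengths
theorem pal5B_eq (w : List Char) (h : w.length = 5) : pal5B w = palA w := by
  match w, h with
  | [a, b, c, d, e], _ =>
    rw [Bool.eq_iff_iff]
    simp only [pal5B, palA, List.getD, List.getElem?_cons_zero,
      List.getElem?_cons_succ, Option.getD_some,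
      show ([a, b, c, d, e] : List Char).reverse = [e, d, c, b, a] from by simp,
      List.cons_beq_cons, Bool.and_eq_true, beq_iff_eq]
    constructor
    · rintro ⟨h1, h2⟩; exact ⟨h1, h2, trivial, h2.symm, h1.symm, trivial⟩
    · rintro ⟨h1, h2, -⟩; exact ⟨h1, h2⟩

theorem pal6B_eq (v : List Char) (h : v.length = 6) : pal6B v = palA v := by
  match v, h with
  | [a, b, c, d, e, f], _ =>
    rw [Bool.eq_iff_iff]
    simp only [pal6B, palA, List.getD, List.getElem?_cons_zero,
      List.getElem?_cons_succ, Option.getD_some,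
      show ([a, b, c, d, e, f] : List Char).reverse = [f, e, d, c, b, a] from by simp,
      List.cons_beq_cons, Bool.and_eq_true, beq_iff_eq]
    constructor
    · rintro ⟨⟨h1, h2⟩, h3⟩; exact ⟨h1, h2, h3, h3.symm, h2.symm, h1.symm, trivial⟩
    · rintro ⟨h1, h2, h3, -⟩; exact ⟨⟨h1, h2⟩, h3⟩

-- "can window w be validly extended over the remaining suffix?"
def canP : List Char → List Char → Bool
  | [], _ => true
  | c :: r, w => (optsB c).any (fun o =>
      !(palA (w ++ [o])) && !(palA ((w ++ [o]).drop 1)) && canP r ((w ++ [o]).drop 1))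

theorem stepA_eq (cur : List (List Char)) (c : Char) :
    stepA cur c = (optsB c).flatMap (fun pc =>
      (cur.filter (fun k => !(palA (k ++ [pc])) && !(palA ((k ++ [pc]).drop 1)))).map
        (fun k => (k ++ [pc]).drop 1)) := by
  rw [stepA, optsB]
  rw [show (fun (nxt : List (List Char)) (pc : Char) =>
      cur.foldl (fun nxt k =>
        let cand := k ++ [pc]
        if !(palA cand) && !(palA (cand.drop 1)) then nxt ++ [cand.drop 1] else nxt) nxt)
    = (fun nxt pc => nxt ++ (cur.filter (fun k => !(palA (k ++ [pc])) && !(palA ((k ++ [pc]).drop 1)))).map (fun k => (k ++ [pc]).drop 1)) from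
    funext₂ (fun nxt pc => PySem.List.foldl_append_if _ _ _ _)]
  rw [PySem.List.foldl_append_eq_flatMap]
  simp

theorem mem_stepA (cur : List (List Char)) (c : Char) (y : List Char) :
    y ∈ stepA cur c ↔ ∃ o ∈ optsB c, ∃ k ∈ cur,
      (!(palA (k ++ [o])) && !(palA ((k ++ [o]).drop 1))) = true ∧ y = (k ++ [o]).drop 1 := by
  rw [stepA_eq]
  simp only [List.mem_flatMap, List.mem_map, List.mem_filter]
  constructor
  · rintro ⟨o, ho, k, ⟨hk, hcond⟩, rfl⟩; exact ⟨o, ho, k, hk, hcond, rfl⟩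
  · rintro ⟨o, ho, k, hk, hcond, rfl⟩; exact ⟨o, ho, k, ⟨hk, hcond⟩, rfl⟩

-- A's forward frontier is nonempty iff some current window is extendable
theorem foldl_stepA_ne_nil (rest : List Char) : ∀ (cur : List (List Char)),
    (rest.foldl stepA cur ≠ []) ↔ ∃ w ∈ cur, canP rest w = true := by
  induction rest with
  | nil =>
    intro cur
    rw [List.foldl_nil, Ne, List.eq_nil_iff_forall_not_mem]
    push Not
    simp [canP]
  | cons c r ih =>
    intro cur
    rw [List.foldl_cons, ih (stepA cur c)]
    constructor
    · rintro ⟨v, hv, hc⟩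
      rw [mem_stepA] at hv
      obtain ⟨o, ho, k, hk, hcond, rfl⟩ := hv
      rw [Bool.and_eq_true] at hcond
      refine ⟨k, hk, ?_⟩
      simp only [canP, List.any_eq_true, Bool.and_eq_true]
      exact ⟨o, ho, ⟨hcond.1, hcond.2⟩, hc⟩
    · rintro ⟨w, hw, hc⟩
      simp only [canP, List.any_eq_true, Bool.and_eq_true] at hc
      obtain ⟨o, ho, ⟨h1, h2⟩, h3⟩ := hc
      exact ⟨(w ++ [o]).drop 1, (mem_stepA _ _ _).2
        ⟨o, ho, w, hw, by rw [Bool.and_eq_true]; exact ⟨h1, h2⟩, rfl⟩, h3⟩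

-- B's feasibility set characterised
theorem mem_feasB (rest : List Char) : ∀ (pat : List Char), pat.length = 5 →
    ∀ w, (w ∈ feasB pat rest ↔ matchB w pat = true ∧ palA w = false ∧ canP rest w = true) := by
  induction rest with
  | nil =>
    intro pat hp w
    simp only [feasB, PySem.Set.mem_ofList, List.mem_filter, mem_winsB, Bool.not_eq_true']
    constructor
    · rintro ⟨h1, h2⟩
      have hlen : w.length = 5 := by rw [matchB_length w pat h1, hp]
      exact ⟨h1, by rw [← pal5B_eq w hlen]; exact h2, rfl⟩
    · rintro ⟨h1, h2, -⟩
      have hlen : w.length = 5 := by rw [matchB_length w pat h1, hp]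
      exact ⟨h1, by rw [pal5B_eq w hlen]; exact h2⟩
  | cons c r ih =>
    intro pat hp w
    have hp' : (pat.drop 1 ++ [c]).length = 5 := by
      simp [hp]
    simp only [feasB, PySem.Set.mem_ofList, List.mem_filter, mem_winsB,
      Bool.and_eq_true, List.any_eq_true, Bool.not_eq_true']
    constructor
    · rintro ⟨h1, hp5, o, ho, h6, hmem⟩
      have hlen : w.length = 5 := by rw [matchB_length w pat h1, hp]
      have hne : w ≠ [] := by intro h; rw [h] at hlen; simp at hlen
      have hpal : palA w = false := by rw [← pal5B_eq w hlen]; exact hp5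
      rw [PySem.Set.contains_iff] at hmem
      obtain ⟨-, hpal', hcan⟩ := (ih (pat.drop 1 ++ [c]) hp' _).1 hmem
      refine ⟨h1, hpal, ?_⟩
      simp only [canP, List.any_eq_true, Bool.and_eq_true]
      refine ⟨o, ho, ⟨?_, ?_⟩, ?_⟩
      · rw [Bool.not_eq_true', ← pal6B_eq _ (by simp [hlen])]; exact h6
      · rw [Bool.not_eq_true', ← drop1_append w o hne]; exact hpal'
      · rw [← drop1_append w o hne]; exact hcan
    · rintro ⟨h1, hpal, hcan⟩
      have hlen : w.length = 5 := by rw [matchB_length w pat h1, hp]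
      have hne : w ≠ [] := by intro h; rw [h] at hlen; simp at hlen
      simp only [canP, List.any_eq_true, Bool.and_eq_true, Bool.not_eq_true'] at hcan
      obtain ⟨o, ho, ⟨h6, hpal'⟩, hcan'⟩ := hcan
      refine ⟨h1, by rw [pal5B_eq w hlen]; exact hpal, o, ho, ?_, ?_⟩
      · rw [pal6B_eq _ (by simp [hlen])]; exact h6
      · rw [PySem.Set.contains_iff]
        refine (ih (pat.drop 1 ++ [c]) hp' _).2 ⟨?_, ?_, ?_⟩
        · exact (matchB_append_singleton (pat.drop 1) c _).2
            ⟨w.drop 1, o, rfl, matchB_drop1 w pat h1, (mem_optsB c o).1 ho⟩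
        · rw [drop1_append w o hne]; exact hpal'
        · rw [drop1_append w o hne]; exact hcan'

theorem solution_eq_alt (S : String) : solution S = solution_alt S := by
  simp only [solution, solution_alt]
  by_cases h5 : PySem.Str.len S < 5
  · rw [if_pos h5, if_pos h5]
  · rw [if_neg h5, if_neg h5]
    have hlen : PySem.Str.len S = ((S.toList.length : Int)) := by simp [pysem]
    rw [hlen, PySem.List.foldl_pyRange_pyGetD' S.toList ' ' stepA _ (a := 5) (by omega)]
    simp only [show (5:Int).toNat = 5 from rfl]
    have h5n : 5 ≤ S.toList.length := by
      rw [hlen] at h5; exact_mod_cast not_lt.1 h5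
    have htake : (S.toList.take 5).length = 5 := by rw [List.length_take]; omega
    -- the starting frontier of A, characterised through matchB
    have hposs : ∀ x, x ∈ (expandLoop ((S.toList.take 5).length + 1)
          [S.toList.take 5]).filter (fun s => !(palA s)) ↔
        (matchB x (S.toList.take 5) = true ∧ palA x = false) := by
      intro x
      rw [List.mem_filter, Bool.not_eq_true']
      have hA : x ∈ expandLoop ((S.toList.take 5).length + 1) [S.toList.take 5] ↔
          matchB x (S.toList.take 5) = true := by
        rw [expandLoop_mem ((S.toList.take 5).count '?') ((S.toList.take 5).length + 1)
          [S.toList.take 5] x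
          (by have := List.count_le_length (l := S.toList.take 5) (a := '?'); omega)
          (by intro s hs; simp at hs; rw [hs])]
        simp
      rw [hA]
    -- both emptiness conditions coincide
    have hiff : ((S.toList.drop 5).foldl stepA ((expandLoop ((S.toList.take 5).length + 1)
          [S.toList.take 5]).filter (fun s => !(palA s))) ≠ []) ↔
        ∃ w, w ∈ feasB (S.toList.take 5) (S.toList.drop 5) := by
      rw [foldl_stepA_ne_nil]
      constructor
      · rintro ⟨w, hw, hc⟩
        obtain ⟨h1, h2⟩ := (hposs w).1 hw
        exact ⟨w, (mem_feasB _ _ htake w).2 ⟨h1, h2, hc⟩⟩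
      · rintro ⟨w, hw⟩
        obtain ⟨h1, h2, hc⟩ := (mem_feasB _ _ htake w).1 hw
        exact ⟨w, (hposs w).2 ⟨h1, h2⟩, hc⟩
    by_cases hA0 : (S.toList.drop 5).foldl stepA ((expandLoop ((S.toList.take 5).length + 1)
        [S.toList.take 5]).filter (fun s => !(palA s))) = []
    · rw [hA0]
      have : feasB (S.toList.take 5) (S.toList.drop 5) = [] := by
        rw [List.eq_nil_iff_forall_not_mem]
        intro w hw
        exact (hiff.2 ⟨w, hw⟩) hA0
      rw [show (feasB (S.toList.take 5) (S.toList.drop 5)).isEmpty = true by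
        rw [List.isEmpty_iff]; exact this]
      simp
    · rw [if_pos (by
        cases h : (S.toList.drop 5).foldl stepA ((expandLoop ((S.toList.take 5).length + 1)
          [S.toList.take 5]).filter (fun s => !(palA s))) with
        | nil => exact absurd h hA0
        | cons a t => simp)]
      obtain ⟨w, hw⟩ := hiff.1 hA0
      rw [if_neg (by
        intro hem
        rw [List.isEmpty_iff, List.eq_nil_iff_forall_not_mem] at hem
        exact hem w hw)]

-- ===== VERDICT (by name: the statement is the Claim_ definition above) =====
theorem solution_spec : Claim_equal_solution := by
  intro S _
  exact solution_eq_alt S
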